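-- pv_equiv track=rewrite | github.com/liyongsea/parallel_corpus_mnbvc | download_data/un_corpus_doc_url/request/new_sample_doc2txt.py | parse_spliter_line
-- ===== SOURCE A (Python) =====
-- from typing import List, Union, Tuple
--
-- def parse_spliter_line(spliter_line_text: str) -> List[int]:
--     col_widths = []
--     lborder = -1
--     rborder = -1 # 左闭右闭区间下标
--     for cidx, c in enumerate(spliter_line_text): # 遍历分割行的每一个字符，统计列宽
--         if c == '-':
--             rborder = cidx
--             if lborder == -1:
--                 lborder = cidx
--         else: # 空格，c == ' '，正则保证的
--             if lborder != -1:
--                 col_widths.append((lborder, rborder)) # 记录列宽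
--                 lborder = -1
--                 rborder = -1
--     if lborder != -1:
--         col_widths.append((lborder, rborder)) # 记录列宽
--     return col_widths
-- ===== SOURCE B (Python) =====
-- def parse_spliter_line(spliter_line_text):
--     # Scan for maximal dash runs directly: no lborder/rborder state, no trailing flush.
--     res = []
--     i = 0
--     n = len(spliter_line_text)
--     while i < n:
--         if spliter_line_text[i] == '-':
--             j = i
--             while j + 1 < n and spliter_line_text[j + 1] == '-':
--                 j += 1
--             res.append((i, j))
--             i = j + 1
--         else:
--             i += 1
--     return res
-- ===== Notes on version B (the rewrite author's own statement) =====
-- stated objective: alternative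
-- what changed: Replaces the per-character state machine (lborder/rborder tracking plus trailing flush) with a direct scanner that, at each dash, consumes the whole maximal dash run at once and emits its interval immediately.
import Mathlib
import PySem

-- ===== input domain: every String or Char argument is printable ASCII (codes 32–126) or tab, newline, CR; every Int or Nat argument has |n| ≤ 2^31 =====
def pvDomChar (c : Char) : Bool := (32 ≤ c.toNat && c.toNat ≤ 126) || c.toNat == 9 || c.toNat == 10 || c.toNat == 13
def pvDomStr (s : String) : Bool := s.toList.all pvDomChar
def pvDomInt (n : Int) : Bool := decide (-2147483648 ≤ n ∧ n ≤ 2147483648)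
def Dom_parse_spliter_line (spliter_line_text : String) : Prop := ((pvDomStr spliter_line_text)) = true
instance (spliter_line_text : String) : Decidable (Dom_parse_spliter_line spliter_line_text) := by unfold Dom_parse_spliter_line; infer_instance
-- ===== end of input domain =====

-- B replaces A's per-character lborder/rborder state machine (with trailing flush) by a
-- scanner that consumes each maximal dash run at once and emits its interval immediately (alternative decomposition).


-- ===== PORT A =====
-- A's for-loop over enumerate(s), carrying (col_widths, lborder, rborder); the base case is A's trailing flush.
def pvALoop : List Char → Int → List (Int × Int) → Int → Int → List (Int × Int)
  | [], _, cw, lb, rb => if lb ≠ -1 then cw ++ [(lb, rb)] else cw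
  | c :: rest, i, cw, lb, rb =>
    if c = '-' then pvALoop rest (i + 1) cw (if lb = -1 then i else lb) i
    else if lb ≠ -1 then pvALoop rest (i + 1) (cw ++ [(lb, rb)]) (-1) (-1)
    else pvALoop rest (i + 1) cw lb rb

def parse_spliter_line (spliter_line_text : String) : List (Int × Int) :=
  pvALoop spliter_line_text.toList 0 [] (-1) (-1)

-- ===== PORT B =====
-- B's scanner: on a dash at index i, take the whole maximal run (the inner while-loop = takeWhile) and emit (i, j).
def pvBRuns : List Char → Int → List (Int × Int)
  | [], _ => []
  | c :: rest, i =>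
    if c = '-' then
      let n : Nat := (rest.takeWhile (· == '-')).length
      (i, i + (n : Int)) :: pvBRuns (rest.drop n) (i + (n : Int) + 1)
    else pvBRuns rest (i + 1)
termination_by l _ => l.length
decreasing_by
  · simp only [List.length_cons, List.length_drop]; omega
  · simp

def parse_spliter_line_alt (spliter_line_text : String) : List (Int × Int) :=
  pvBRuns spliter_line_text.toList 0

-- ===== PRECONDITION & SPEC =====
def Spec_parse_spliter_line (spliter_line_text : String) (out : List (Int × Int)) : Prop := out = parse_spliter_line_alt spliter_line_text
instance (spliter_line_text : String) (out : List (Int × Int)) : Decidable (Spec_parse_spliter_line spliter_line_text out) := by unfold Spec_parse_spliter_line; infer_instance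

-- ===== CLAIM (what is proved, stated in full; the proofs are below) =====
def Claim_equal_parse_spliter_line : Prop := ∀ (spliter_line_text : String), Dom_parse_spliter_line spliter_line_text → Spec_parse_spliter_line spliter_line_text (parse_spliter_line spliter_line_text)

-- ===== LEMMAS AND PROOFS =====

-- Joint invariant, by strong induction on the list:
-- outside a run (lb = rb = -1) A's loop appends exactly B's runs; inside a run that started
-- at lb ≥ 0 and whose last dash was at i-1, A's loop finishes the run at i-1+k (k = leading dashes of l).
theorem pvLoop_inv (N : Nat) : ∀ (l : List Char), l.length ≤ N →
    (∀ (i : Int) (cw : List (Int × Int)), 0 ≤ i →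
        pvALoop l i cw (-1) (-1) = cw ++ pvBRuns l i) ∧
    (∀ (i lb : Int) (cw : List (Int × Int)), 0 ≤ i → 0 ≤ lb →
        pvALoop l i cw lb (i - 1) =
          cw ++ (lb, i - 1 + ((l.takeWhile (· == '-')).length : Int)) ::
            pvBRuns (l.drop (l.takeWhile (· == '-')).length)
              (i + ((l.takeWhile (· == '-')).length : Int))) := by
  induction N with
  | zero =>
    intro l hl
    match l, hl with
    | [], _ =>
      constructor
      · intro i cw _; simp [pvALoop, pvBRuns]
      · intro i lb cw _ hlb
        simp [pvALoop, pvBRuns]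
        omega
  | succ N ih =>
    intro l hl
    match l with
    | [] =>
      constructor
      · intro i cw _; simp [pvALoop, pvBRuns]
      · intro i lb cw _ hlb
        simp [pvALoop, pvBRuns]
        omega
    | c :: rest =>
      have ihR := ih rest (by simp at hl; omega)
      constructor
      · intro i cw hi
        by_cases hc : c = '-'
        · have h0 : pvALoop (c :: rest) i cw (-1) (-1) =
              pvALoop rest (i + 1) cw i i := by
            simp [pvALoop, hc]
          rw [h0]
          have := ihR.2 (i + 1) i cw (by omega) hi
          simp only [show i + 1 - 1 = i by ring] at this
          rw [this]
          simp [pvBRuns, hc]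
          congr 1
          ring
        · have h0 : pvALoop (c :: rest) i cw (-1) (-1) =
              pvALoop rest (i + 1) cw (-1) (-1) := by
            simp [pvALoop, hc]
          rw [h0, ihR.1 (i + 1) cw (by omega)]
          simp [pvBRuns, hc]
      · intro i lb cw hi hlb
        have hlb' : lb ≠ -1 := by omega
        by_cases hc : c = '-'
        · have h0 : pvALoop (c :: rest) i cw lb (i - 1) =
              pvALoop rest (i + 1) cw lb i := by
            simp [pvALoop, hc, hlb']
          rw [h0]
          have := ihR.2 (i + 1) lb cw (by omega) hlb
          simp only [show i + 1 - 1 = i by ring] at this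
          rw [this]
          simp [hc, List.takeWhile]
          congr 1
          ring
        · have hcb : (c == '-') = false := by simp [hc]
          have h0 : pvALoop (c :: rest) i cw lb (i - 1) =
              pvALoop rest (i + 1) (cw ++ [(lb, i - 1)]) (-1) (-1) := by
            simp [pvALoop, hc, hlb']
          rw [h0, ihR.1 (i + 1) _ (by omega)]
          simp [pvBRuns, hcb, List.takeWhile]
          intro h
          exact (hc h).elim

-- ===== VERDICT (by name: the statement is the Claim_ definition above) =====
theorem parse_spliter_line_spec : Claim_equal_parse_spliter_line := by
  intro s _
  show parse_spliter_line s = parse_spliter_line_alt s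
  unfold parse_spliter_line parse_spliter_line_alt
  simpa using (pvLoop_inv s.toList.length s.toList le_rfl).1 0 [] le_rfl
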